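-- pv_equiv track=rewrite | github.com/carlesmatoses/AMMM-Project-2024 | InstanceGeneratorCustom/generateInstance.py | generate_department_for_member
-- ===== SOURCE A (Python) =====
-- def generate_department_for_member(D, N):
--     members = []
--     group_size = N // D
--     remainder = N % D
--     for i in range(1, D + 1):
--         members.extend([i] * group_size)
--     members.extend([D] * remainder)
--     return members
-- ===== SOURCE B (Python) =====
-- def generate_department_for_member(D, N):
--     group_size = N // D
--     if group_size > 0:
--         return [min(p // group_size + 1, D) for p in range(N)]
--     return [D] * (N % D)
-- ===== Notes on version B (the rewrite author's own statement) =====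
-- stated objective: alternative
-- what changed: Replaces the per-department loop that extends blocks (plus a separate remainder extend) with a single per-member comprehension computing each position's department as min(p . group_size + 1, D), with a direct remainder formula when group_size is 0.
import Mathlib
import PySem

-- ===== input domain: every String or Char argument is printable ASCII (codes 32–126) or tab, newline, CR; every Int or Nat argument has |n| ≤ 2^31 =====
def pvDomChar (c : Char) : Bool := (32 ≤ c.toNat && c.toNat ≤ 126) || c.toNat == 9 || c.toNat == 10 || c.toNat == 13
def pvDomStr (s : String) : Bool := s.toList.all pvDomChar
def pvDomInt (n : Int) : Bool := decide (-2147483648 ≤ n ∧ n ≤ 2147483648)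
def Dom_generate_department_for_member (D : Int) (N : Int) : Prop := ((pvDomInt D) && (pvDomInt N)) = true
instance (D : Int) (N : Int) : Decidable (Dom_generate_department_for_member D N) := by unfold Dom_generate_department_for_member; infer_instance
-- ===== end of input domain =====

-- B builds the list per member with one comprehension instead of A's per-department block extends plus a separate remainder extend; same cost, different decomposition.

-- ===== PORT A =====
def generate_department_for_member (D : Int) (N : Int) : List Int :=
  let group_size := PySem.Int.floordiv N D
  let remainder := PySem.Int.mod N D
  let members : List Int :=
    (PySem.List.pyRange 1 (D + 1) 1).foldl
      (fun acc i => acc ++ PySem.List.pyRepeat [i] group_size) []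
  members ++ PySem.List.pyRepeat [D] remainder

-- ===== PORT B =====
def generate_department_for_member_alt (D : Int) (N : Int) : List Int :=
  let group_size := PySem.Int.floordiv N D
  if group_size > 0 then
    (PySem.List.pyRange 0 N 1).map (fun p => min (PySem.Int.floordiv p group_size + 1) D)
  else
    PySem.List.pyRepeat [D] (PySem.Int.mod N D)

-- ===== PRECONDITION & SPEC =====
-- Python raises ZeroDivisionError at D = 0 (in both A and B); that is the only excluded input.
def Pre_generate_department_for_member (D : Int) (N : Int) : Prop := D ≠ 0
instance (D : Int) (N : Int) : Decidable (Pre_generate_department_for_member D N) := by unfold Pre_generate_department_for_member; infer_instance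
def pvWitness_generate_department_for_member : Int × Int := (3, 7)
def Spec_generate_department_for_member (D : Int) (N : Int) (out : List Int) : Prop := out = generate_department_for_member_alt D N
instance (D : Int) (N : Int) (out : List Int) : Decidable (Spec_generate_department_for_member D N out) := by unfold Spec_generate_department_for_member; infer_instance

-- ===== CLAIM (what is proved, stated in full; the proofs are below) =====
def Claim_equal_generate_department_for_member : Prop := ∀ (D : Int) (N : Int), Dom_generate_department_for_member D N → Pre_generate_department_for_member D N → Spec_generate_department_for_member D N (generate_department_for_member D N)

-- ===== LEMMAS AND PROOFS =====

theorem pv_const_block (g : Nat) (d : Nat) (f : Nat → Nat) (h : ∀ j ∈ List.range g, f j = d) :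
    (List.range g).map f = List.replicate g d := by
  rw [List.eq_replicate_iff]
  refine ⟨by simp, ?_⟩
  intro b hb
  obtain ⟨j, hj, rfl⟩ := List.mem_map.mp hb
  exact h j hj

theorem pv_lemma1 (g : Nat) (hg : 0 < g) (d : Nat) :
    (List.range (d*g)).map (fun p => p/g) = (List.range d).flatMap (fun i => List.replicate g i) := by
  induction d with
  | zero => simp
  | succ d ih =>
    have h1 : (d+1)*g = d*g + g := by ring
    rw [h1, List.range_add, List.map_append, ih, List.range_succ, List.flatMap_append]
    congr 1
    rw [List.flatMap_singleton, List.map_map]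
    apply pv_const_block
    intro j hj
    show (d*g + j)/g = d
    rw [mul_comm d g, Nat.mul_add_div hg, Nat.div_eq_of_lt (List.mem_range.mp hj)]
    omega

theorem pv_main (g : Nat) (hg : 0 < g) (d r : Nat) :
    (List.range (d*g+r)).map (fun p => min (p/g+1) d) =
      (List.range d).flatMap (fun i => List.replicate g (i+1)) ++ List.replicate r d := by
  rw [List.range_add, List.map_append]
  congr 1
  · have h1 : ∀ p ∈ List.range (d*g), min (p/g+1) d = p/g + 1 := by
      intro p hp
      have : p/g < d := (Nat.div_lt_iff_lt_mul hg).mpr (by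
        have := List.mem_range.mp hp; omega)
      omega
    rw [List.map_congr_left h1]
    have he : (fun p => p/g + 1) = (fun x => x + 1) ∘ (fun p => p/g) := rfl
    rw [he, ← List.map_map, pv_lemma1 g hg d, List.map_flatMap]
    simp
  · rw [List.map_map]
    apply pv_const_block
    intro j hj
    show min ((d*g + j)/g + 1) d = d
    have hd : d ≤ (d*g+j)/g := by
      rw [mul_comm d g, Nat.mul_add_div hg]
      exact Nat.le_add_right _ _
    omega

theorem pv_int_main (D N gs r : Int) (hDpos : 0 < D) (hgpos : 0 < gs)
    (hr0 : 0 ≤ r) (hNr : gs * D + r = N) :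
    ((PySem.List.pyRange 1 (D+1) 1).flatMap (List.replicate gs.toNat)) ++ List.replicate r.toNat D
      = (PySem.List.pyRange 0 N 1).map (fun p => min (PySem.Int.floordiv p gs + 1) D) := by
  set d := D.toNat with hd
  set g := gs.toNat with hg
  set rr := r.toNat with hrr
  have hdD : (d : Int) = D := Int.toNat_of_nonneg (by omega)
  have hgG : (g : Int) = gs := Int.toNat_of_nonneg (by omega)
  have hrR : (rr : Int) = r := Int.toNat_of_nonneg hr0
  have hN : 0 < N := by nlinarith
  have hcast : ((d * g + rr : Nat) : Int) = N := by push_cast [hdD, hgG, hrR]; nlinarith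
  have hNt : (N - 0).toNat = d * g + rr := by
    have := Int.toNat_of_nonneg (le_of_lt hN)
    omega
  have hg1 : 0 < g := by omega
  rw [PySem.List.pyRange_one 1 (D+1), PySem.List.pyRange_one 0 N]
  have e1 : (D + 1 - 1).toNat = d := by omega
  rw [e1, hNt]
  have eR : ((List.range (d*g+rr)).map (fun k : Nat => (0:Int) + k)).map
        (fun p => min (PySem.Int.floordiv p gs + 1) D)
      = (List.range (d*g+rr)).map (fun p => ((min (p/g+1) d : Nat) : Int)) := by
    rw [List.map_map]
    apply List.map_congr_left
    intro k _
    show min (PySem.Int.floordiv ((0:Int) + (k:Int)) gs + 1) D = ((min (k/g+1) d : Nat) : Int)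
    rw [zero_add, ← hgG, ← hdD, PySem.Int.floordiv_natCast]
    push_cast
    rfl
  rw [eR]
  have eM := congrArg (List.map (fun n : Nat => (n : Int))) (pv_main g hg1 d rr)
  rw [List.map_map] at eM
  have eM' : (List.range (d*g+rr)).map (fun p => ((min (p/g+1) d : Nat) : Int))
      = ((List.range d).flatMap (fun i => List.replicate g (i+1))
          ++ List.replicate rr d).map (fun n : Nat => (n : Int)) := eM
  rw [eM', List.map_append, List.map_flatMap, List.map_replicate]
  rw [List.flatMap_map]
  have hfun : (fun a : Nat => List.replicate g ((1:Int) + a))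
      = (fun a : Nat => (List.replicate g (a+1)).map (fun n : Nat => (n : Int))) := by
    funext i
    show List.replicate g ((1:Int) + i) = (List.replicate g (i+1)).map (fun n : Nat => (n : Int))
    rw [List.map_replicate]
    congr 1
    push_cast
    ring
  rw [hfun, hdD]

-- ===== VERDICT (by name: the statement is the Claim_ definition above) =====
theorem generate_department_for_member_spec : Claim_equal_generate_department_for_member := by
  intro D N _ hPre
  unfold Spec_generate_department_for_member
  unfold generate_department_for_member generate_department_for_member_alt
  simp only [PySem.List.pyRepeat_singleton, PySem.List.foldl_append_eq_flatMap, List.nil_append]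
  set gs := PySem.Int.floordiv N D with hgs
  set r := PySem.Int.mod N D with hr
  have hNr : gs * D + r = N := PySem.Int.floordiv_mul_add_mod N D
  rcases lt_or_gt_of_ne hPre with hDneg | hDpos
  · -- D < 0 : both sides are []
    have hrb := PySem.Int.mod_neg_bounds (a := N) (b := D) hDneg
    rw [PySem.List.pyRange_one_eq_nil (by omega)]
    have hr0 : r.toNat = 0 := by omega
    simp only [List.flatMap_nil, List.nil_append, hr0, List.replicate_zero]
    split_ifs with hgpos
    · have hN : N ≤ 0 := by nlinarith
      rw [PySem.List.pyRange_one_eq_nil (by omega)]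
      simp
    · simp
  · -- D > 0
    have hr0 : 0 ≤ r := PySem.Int.mod_nonneg N hDpos
    split_ifs with hgpos
    · exact pv_int_main D N gs r hDpos hgpos hr0 hNr
    · have hz : ∀ x ∈ PySem.List.pyRange 1 (D+1) 1, List.replicate gs.toNat x = ([] : List Int) := by
        intro x _
        have : gs.toNat = 0 := by omega
        simp [this]
      rw [List.flatMap_eq_nil_iff.mpr hz]
      simp
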